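-- pv_equiv track=rewrite | github.com/sepal-contrib/se.plan | component/widget/expression.py | expand_wabi
-- ===== SOURCE A (Python) =====
-- from collections import defaultdict
--
-- def expand_wabi(benefit_names, weights):
--     if len(benefit_names) != len(weights):
--         return "Error: The length of benefit names and weights must match."
--
--     # Grouping weights by benefit name
--     weight_groups = defaultdict(list)
--     benefit_indices = defaultdict(int)
--
--     for name, weight in zip(benefit_names, weights):
--         benefit_indices[name] += 1
--         weight_groups[name].append(weight)
--
--     # Building LaTeX expressions for each group
--     WtBt_expressions = []
--     Wt_expressions = []
--
--     for name in sorted(weight_groups.keys()):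
--         num_entries = len(weight_groups[name])
--         indices = range(1, num_entries + 1)
--
--         if num_entries > 1:
--             name_expr = f"\\left(\\frac{{{' + '.join(f'{name}_{{{i}}}' for i in indices)}}}{{{num_entries}}}\\right)"
--             Wt_expr = f"\\left(\\frac{{{' + '.join(map(str, weight_groups[name]))}}}{{{num_entries}}}\\right)"
--         else:
--             name_expr = f"{name}_1"
--             Wt_expr = str(weight_groups[name][0])
--
--         WtBt_expressions.append(f"({Wt_expr} \\times {name_expr})")
--         Wt_expressions.append(Wt_expr)
--
--     # Joining the expressions with "+" for sum in LaTeX style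
--     sum_WtBt = " + ".join(WtBt_expressions)
--     sum_Wt = " + ".join(Wt_expressions)
--
--     # Generating the full wabi formula in LaTeX notation
--     wabi_formula = f"$$wabi = \\frac{{{sum_WtBt}}}{{{sum_Wt}}}$$"
--     return wabi_formula
-- ===== SOURCE B (Python) =====
-- def _piece(name, ws):
--     """Return (WtBt term, Wt term) for one benefit name with its weight list ws."""
--     k = len(ws)
--     if k > 1:
--         name_expr = "\\left(\\frac{" + " + ".join(name + "_{" + str(i) + "}" for i in range(1, k + 1)) + "}{" + str(k) + "}\\right)"
--         wt_expr = "\\left(\\frac{" + " + ".join(str(w) for w in ws) + "}{" + str(k) + "}\\right)"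
--     else:
--         name_expr = name + "_1"
--         wt_expr = str(ws[0])
--     return "(" + wt_expr + " \\times " + name_expr + ")", wt_expr
--
--
-- def expand_wabi(benefit_names, weights):
--     if len(benefit_names) != len(weights):
--         return "Error: The length of benefit names and weights must match."
--     # stable sort by name keeps each name's weights in input order;
--     # then one walk over the consecutive name-groups — no dict is built
--     pairs = sorted(zip(benefit_names, weights), key=lambda p: p[0])
--     pieces = []
--     i, n = 0, len(pairs)
--     while i < n:
--         name = pairs[i][0]
--         j = i + 1
--         while j < n and pairs[j][0] == name:
--             j += 1
--         pieces.append(_piece(name, [w for _, w in pairs[i:j]]))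
--         i = j
--     sum_WtBt = " + ".join(p[0] for p in pieces)
--     sum_Wt = " + ".join(p[1] for p in pieces)
--     return "$$wabi = \\frac{" + sum_WtBt + "}{" + sum_Wt + "}$$"
-- ===== Notes on version B (the rewrite author's own statement) =====
-- stated objective: alternative
-- what changed: Replaces the defaultdict grouping loop (plus the unused benefit_indices counter) and the later sorted-keys pass by one stable sort of the (name, weight) pairs followed by a single walk that cuts consecutive name-groups; stability keeps each name's weights in input order.
import Mathlib
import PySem

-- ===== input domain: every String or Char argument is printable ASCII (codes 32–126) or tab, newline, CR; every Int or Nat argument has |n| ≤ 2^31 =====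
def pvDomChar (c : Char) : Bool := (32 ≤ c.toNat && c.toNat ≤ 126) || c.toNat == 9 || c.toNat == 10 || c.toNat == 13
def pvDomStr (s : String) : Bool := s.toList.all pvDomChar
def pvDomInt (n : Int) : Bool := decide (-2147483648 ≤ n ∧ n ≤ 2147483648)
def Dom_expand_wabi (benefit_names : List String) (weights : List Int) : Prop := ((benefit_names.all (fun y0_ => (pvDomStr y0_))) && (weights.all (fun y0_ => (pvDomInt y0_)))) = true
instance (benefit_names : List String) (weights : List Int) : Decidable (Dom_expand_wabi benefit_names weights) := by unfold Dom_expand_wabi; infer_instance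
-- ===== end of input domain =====

-- B replaces A's defaultdict grouping + sorted-keys pass (and the unused counter)
-- by one stable sort of the (name, weight) pairs and one walk over consecutive groups.

-- ===== PORT A =====
-- body of A's output loop: the (WtBt, Wt) pair appended for one sorted key
def pvA_build (weight_groups : PySem.Dict String (List Int)) (name : String) : String × String :=
  let g := weight_groups.getD name []
  let num : Int := (g.length : Int)
  if num > 1 then
    let name_expr := "\\left(\\frac{" ++ PySem.Str.join " + "
        ((PySem.List.pyRange 1 (num + 1) 1).map (fun i => name ++ "_{" ++ PySem.Int.toStr i ++ "}"))
        ++ "}{" ++ PySem.Int.toStr num ++ "}\\right)"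
    let wt_expr := "\\left(\\frac{" ++ PySem.Str.join " + " (g.map PySem.Int.toStr)
        ++ "}{" ++ PySem.Int.toStr num ++ "}\\right)"
    ("(" ++ wt_expr ++ " \\times " ++ name_expr ++ ")", wt_expr)
  else
    -- weight_groups[name][0]: the group of a present key is nonempty, so Python never raises;
    -- the .getD 0 default is unreachable
    let name_expr := name ++ "_1"
    let wt_expr := PySem.Int.toStr ((PySem.List.pyGet? g 0).getD 0)
    ("(" ++ wt_expr ++ " \\times " ++ name_expr ++ ")", wt_expr)

def expand_wabi (benefit_names : List String) (weights : List Int) : String :=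
  if benefit_names.length ≠ weights.length then
    "Error: The length of benefit names and weights must match."
  else
    -- one loop maintaining benefit_indices (unused) and weight_groups
    let st := (benefit_names.zip weights).foldl
      (fun (st : PySem.Dict String Int × PySem.Dict String (List Int)) p =>
        (st.1.modify p.1 0 (· + 1), st.2.modify p.1 [] (· ++ [p.2])))
      (PySem.Dict.empty, PySem.Dict.empty)
    let weight_groups := st.2
    let exprs := (PySem.List.sorted weight_groups.keys (fun x => x) false).foldl
      (fun (acc : List String × List String) name =>
        let e := pvA_build weight_groups name
        (acc.1 ++ [e.1], acc.2 ++ [e.2]))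
      ([], [])
    "$$wabi = \\frac{" ++ PySem.Str.join " + " exprs.1 ++ "}{" ++ PySem.Str.join " + " exprs.2 ++ "}$$"

-- ===== PORT B =====
-- _piece: the (WtBt, Wt) pair for one benefit name with its weight list ws
def pvB_piece (name : String) (ws : List Int) : String × String :=
  let k : Int := (ws.length : Int)
  if k > 1 then
    let name_expr := "\\left(\\frac{" ++ PySem.Str.join " + "
        ((PySem.List.pyRange 1 (k + 1) 1).map (fun i => name ++ "_{" ++ PySem.Int.toStr i ++ "}"))
        ++ "}{" ++ PySem.Int.toStr k ++ "}\\right)"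
    let wt_expr := "\\left(\\frac{" ++ PySem.Str.join " + " (ws.map PySem.Int.toStr)
        ++ "}{" ++ PySem.Int.toStr k ++ "}\\right)"
    ("(" ++ wt_expr ++ " \\times " ++ name_expr ++ ")", wt_expr)
  else
    -- ws[0]: every walked group starts with one pair, so ws is nonempty; default unreachable
    ("(" ++ PySem.Int.toStr ((PySem.List.pyGet? ws 0).getD 0) ++ " \\times " ++ (name ++ "_1") ++ ")",
     PySem.Int.toStr ((PySem.List.pyGet? ws 0).getD 0))

-- the i/j walk of Source B over the name-sorted pair list: cut one consecutive name-group per step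
def pvB_groups : List (String × Int) → List (String × List Int)
  | [] => []
  | (n, w) :: rest =>
      (n, w :: (rest.takeWhile (fun p => p.1 == n)).map (·.2)) ::
        pvB_groups (rest.dropWhile (fun p => p.1 == n))
termination_by l => l.length
decreasing_by
  simp only [List.length_cons]
  have := List.length_dropWhile_le (fun p => p.1 == n) rest
  omega

def expand_wabi_alt (benefit_names : List String) (weights : List Int) : String :=
  if benefit_names.length ≠ weights.length then
    "Error: The length of benefit names and weights must match."
  else
    let pairs := PySem.List.sorted (benefit_names.zip weights) (fun p => p.1) false
    let pieces := (pvB_groups pairs).map (fun g => pvB_piece g.1 g.2)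
    "$$wabi = \\frac{" ++ PySem.Str.join " + " (pieces.map (·.1)) ++ "}{"
      ++ PySem.Str.join " + " (pieces.map (·.2)) ++ "}$$"

-- ===== PRECONDITION & SPEC =====
def Spec_expand_wabi (benefit_names : List String) (weights : List Int) (out : String) : Prop := out = expand_wabi_alt benefit_names weights
instance (benefit_names : List String) (weights : List Int) (out : String) : Decidable (Spec_expand_wabi benefit_names weights out) := by unfold Spec_expand_wabi; infer_instance

-- ===== CLAIM (what is proved, stated in full; the proofs are below) =====
def Claim_equal_expand_wabi : Prop := ∀ (benefit_names : List String) (weights : List Int), Dom_expand_wabi benefit_names weights → Spec_expand_wabi benefit_names weights (expand_wabi benefit_names weights)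

-- ===== LEMMAS AND PROOFS =====

-- A's grouping dict, looked up at any name, is the filter of the zipped pairs
lemma groups_getD (pairs : List (String × Int)) (name : String) :
    ((pairs.foldl (fun d p => d.modify p.1 [] (· ++ [p.2])) PySem.Dict.empty).getD name [])
      = (pairs.filter (fun p => p.1 == name)).map (·.2) := by
  simpa using PySem.Dict.getD_foldl_modify_append (l := pairs) (d := PySem.Dict.empty) (c := name)

-- A's grouping dict has exactly the distinct first components as keys
lemma groups_keys (pairs : List (String × Int)) :
    (pairs.foldl (fun d p => d.modify p.1 [] (· ++ [p.2])) PySem.Dict.empty).keys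
      = PySem.Set.ofList (pairs.map (·.1)) := by
  simpa using PySem.Dict.keys_foldl_modify_key (l := pairs) (key := (·.1))
      (d0 := []) (f := fun _ p => (· ++ [p.2])) (d := PySem.Dict.empty)

-- per-name pieces agree once the group list is the filtered list
lemma build_eq_piece (wg : PySem.Dict String (List Int)) (name : String) (ws : List Int)
    (h : wg.getD name [] = ws) : pvA_build wg name = pvB_piece name ws := by
  unfold pvA_build pvB_piece
  simp only [h]

-- mapping the key projection through a pair-insertion is a key-insertion
lemma map_fst_insertBy (x : String × Int) (ys : List (String × Int)) :
    (PySem.List.insertBy (fun a b => decide (a.1 < b.1)) x ys).map (·.1)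
      = PySem.List.insertBy (fun a b => decide (a < b)) x.1 (ys.map (·.1)) := by
  induction ys with
  | nil => rfl
  | cons y ys ih =>
      simp only [PySem.List.insertBy, List.map_cons]
      by_cases h : x.1 < y.1
      · simp only [h, decide_true, if_true, List.map_cons]
      · simp only [h, decide_false, Bool.false_eq_true, if_false, List.map_cons, ih]

-- the keys of the name-sorted pairs are the sorted names (stable sort, key projection)
lemma map_fst_sorted (pairs : List (String × Int)) :
    (PySem.List.sorted pairs (fun p => p.1) false).map (·.1)
      = PySem.List.sorted (pairs.map (·.1)) (fun x => x) false := by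
  rw [PySem.List.sorted_eq_foldl_insertBy, PySem.List.sorted_eq_foldl_insertBy]
  suffices h : ∀ (l : List (String × Int)) (acc : List (String × Int)),
      (l.foldl (fun acc x => PySem.List.insertBy (fun a b => decide (a.1 < b.1)) x acc) acc).map (·.1)
        = (l.map (·.1)).foldl (fun acc k => PySem.List.insertBy (fun a b => decide (a < b)) k acc) (acc.map (·.1)) by
    simpa using h pairs []
  intro l
  induction l with
  | nil => intro acc; rfl
  | cons x xs ih =>
      intro acc
      simp only [List.foldl_cons, List.map_cons, ih, map_fst_insertBy]

-- inserting into a key-sorted list appends to the slice of any fixed key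
lemma filter_insertBy (k : String) (x : String × Int) :
    ∀ ys : List (String × Int), ys.Pairwise (fun a b => a.1 ≤ b.1) →
    (PySem.List.insertBy (fun a b => decide (a.1 < b.1)) x ys).filter (fun p => p.1 == k)
      = ys.filter (fun p => p.1 == k) ++ (if x.1 == k then [x] else []) := by
  intro ys
  induction ys with
  | nil =>
      intro _
      by_cases hx : x.1 = k <;> simp [PySem.List.insertBy, hx]
  | cons y ys ih =>
      intro hp
      have htail := hp.of_cons
      have hhead : ∀ z ∈ ys, y.1 ≤ z.1 := fun z hz => (List.pairwise_cons.mp hp).1 z hz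
      simp only [PySem.List.insertBy]
      by_cases h : x.1 < y.1
      · simp only [h, decide_true, if_true]
        by_cases hx : x.1 = k
        · -- all keys in y::ys exceed k, so its filter is empty
          have hnil : (y :: ys).filter (fun p => p.1 == k) = [] := by
            apply List.filter_eq_nil_iff.mpr
            intro z hz
            have : y.1 ≤ z.1 := by
              rcases List.mem_cons.mp hz with rfl | hz'
              · exact le_refl _
              · exact hhead z hz'
            have : k < z.1 := lt_of_lt_of_le (hx ▸ h) this
            simp [ne_of_gt this]
          rw [List.filter_cons_of_pos (by simp [hx]), hnil]
          simp [hx]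
        · rw [List.filter_cons_of_neg (by simp [hx])]
          simp [hx]
      · simp only [h, decide_false, Bool.false_eq_true, if_false]
        rw [List.filter_cons, List.filter_cons, ih htail]
        by_cases hy : y.1 = k <;> simp [hy]

-- insertion preserves key-sortedness
lemma pairwise_insertBy (x : String × Int) :
    ∀ ys : List (String × Int), ys.Pairwise (fun a b => a.1 ≤ b.1) →
    (PySem.List.insertBy (fun a b => decide (a.1 < b.1)) x ys).Pairwise (fun a b => a.1 ≤ b.1) := by
  intro ys
  induction ys with
  | nil => intro _; simp [PySem.List.insertBy]
  | cons y ys ih =>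
      intro hp
      have htail := hp.of_cons
      have hhead : ∀ z ∈ ys, y.1 ≤ z.1 := fun z hz => (List.pairwise_cons.mp hp).1 z hz
      simp only [PySem.List.insertBy]
      by_cases h : x.1 < y.1
      · simp only [h, decide_true, if_true]
        refine List.pairwise_cons.mpr ⟨?_, hp⟩
        intro z hz
        rcases List.mem_cons.mp hz with rfl | hz'
        · exact le_of_lt h
        · exact le_trans (le_of_lt h) (hhead z hz')
      · simp only [h, decide_false, Bool.false_eq_true, if_false]
        refine List.pairwise_cons.mpr ⟨?_, ih htail⟩
        intro z hz
        rcases (PySem.List.mem_insertBy _ _ _ _).mp hz with rfl | hz'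
        · exact le_of_not_gt h
        · exact hhead z hz'

-- STABILITY: the fixed-key slice of the name-sorted pairs is the fixed-key slice of the input
lemma filter_sorted (pairs : List (String × Int)) (k : String) :
    (PySem.List.sorted pairs (fun p => p.1) false).filter (fun p => p.1 == k)
      = pairs.filter (fun p => p.1 == k) := by
  rw [PySem.List.sorted_eq_foldl_insertBy]
  suffices h : ∀ (l acc : List (String × Int)), acc.Pairwise (fun a b => a.1 ≤ b.1) →
      (l.foldl (fun acc x => PySem.List.insertBy (fun a b => decide (a.1 < b.1)) x acc) acc).filter (fun p => p.1 == k)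
        = acc.filter (fun p => p.1 == k) ++ l.filter (fun p => p.1 == k) by
    simpa using h pairs [] (by simp)
  intro l
  induction l with
  | nil => intro acc _; simp
  | cons x xs ih =>
      intro acc hacc
      simp only [List.foldl_cons]
      rw [ih _ (pairwise_insertBy x acc hacc), filter_insertBy k x acc hacc, List.filter_cons]
      by_cases hx : x.1 = k
      · simp [hx]
      · simp [hx]

-- on a key-sorted list, the group walk cuts exactly the per-key slices,
-- its keys are strictly increasing, and they are the keys of the list
lemma groups_walk (S : List (String × Int)) : S.Pairwise (fun a b => a.1 ≤ b.1) →
    (∀ g ∈ pvB_groups S, g.2 = (S.filter (fun p => p.1 == g.1)).map (·.2))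
    ∧ ((pvB_groups S).map (·.1)).Pairwise (· < ·)
    ∧ (∀ k, k ∈ (pvB_groups S).map (·.1) ↔ k ∈ S.map (·.1)) := by
  induction S using pvB_groups.induct with
  | case1 => intro _; exact ⟨by simp [pvB_groups], by simp [pvB_groups], by simp [pvB_groups]⟩
  | case2 n w rest ih =>
      intro hS
      have hrest : rest.Pairwise (fun a b => a.1 ≤ b.1) := hS.of_cons
      have hhead : ∀ z ∈ rest, n ≤ z.1 := fun z hz => (List.pairwise_cons.mp hS).1 z hz
      have ht : ∀ z ∈ rest.takeWhile (fun p => p.1 == n), z.1 = n := by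
        intro z hz
        have := List.mem_takeWhile_imp (p := fun q : String × Int => q.1 == n) hz
        simpa using this
      have hdsub : (rest.dropWhile (fun p => p.1 == n)).Sublist rest := List.dropWhile_sublist _
      have hdp : (rest.dropWhile (fun p => p.1 == n)).Pairwise (fun a b => a.1 ≤ b.1) :=
        hrest.sublist hdsub
      have hd_gt : ∀ z ∈ rest.dropWhile (fun p => p.1 == n), n < z.1 := by
        cases hd : rest.dropWhile (fun p => p.1 == n) with
        | nil => intro z hz; simp at hz
        | cons y ys =>
            have hne : rest.dropWhile (fun p => p.1 == n) ≠ [] := by simp [hd]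
            have hyp := List.head_dropWhile_not (fun q : String × Int => q.1 == n) hne
            simp only [hd, List.head_cons] at hyp
            have hyn : y.1 ≠ n := by simpa using hyp
            have hymem : y ∈ rest := hdsub.subset (hd ▸ List.mem_cons_self)
            have hylt : n < y.1 := lt_of_le_of_ne (hhead y hymem) (Ne.symm hyn)
            have hdp' := hd ▸ hdp
            intro z hz
            rcases List.mem_cons.mp hz with rfl | hz'
            · exact hylt
            · exact lt_of_lt_of_le hylt ((List.pairwise_cons.mp hdp').1 z hz')
      have hsplit : rest.takeWhile (fun p => p.1 == n) ++ rest.dropWhile (fun p => p.1 == n) = rest :=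
        List.takeWhile_append_dropWhile
      obtain ⟨ihc, ihp, ihm⟩ := ih hdp
      -- the filter of S at the head key is the head pair plus the takeWhile block
      have h1 : (rest.takeWhile (fun p => p.1 == n)).filter (fun p => p.1 == n)
          = rest.takeWhile (fun p => p.1 == n) :=
        List.filter_eq_self.mpr (fun z hz => by simp [ht z hz])
      have h2 : (rest.dropWhile (fun p => p.1 == n)).filter (fun p => p.1 == n) = [] :=
        List.filter_eq_nil_iff.mpr (fun z hz => by simp [ne_of_gt (hd_gt z hz)])
      have hfr : rest.filter (fun p => p.1 == n) = rest.takeWhile (fun p => p.1 == n) := by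
        conv_lhs => rw [← hsplit]
        rw [List.filter_append, h1, h2, List.append_nil]
      have hfilter_head : ((n, w) :: rest).filter (fun p => p.1 == n)
          = (n, w) :: rest.takeWhile (fun p => p.1 == n) := by
        rw [List.filter_cons_of_pos (by simp), hfr]
      -- the filter of S at any key of the dropped part ignores the head block
      have hfilter_rec : ∀ k, n < k → ((n, w) :: rest).filter (fun p => p.1 == k)
          = (rest.dropWhile (fun p => p.1 == n)).filter (fun p => p.1 == k) := by
        intro k hk
        have h3 : (rest.takeWhile (fun p => p.1 == n)).filter (fun p => p.1 == k) = [] :=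
          List.filter_eq_nil_iff.mpr (fun z hz => by simp [ht z hz, ne_of_lt hk])
        have hfr2 : rest.filter (fun p => p.1 == k)
            = (rest.dropWhile (fun p => p.1 == n)).filter (fun p => p.1 == k) := by
          conv_lhs => rw [← hsplit]
          rw [List.filter_append, h3, List.nil_append]
        rw [List.filter_cons_of_neg (by simp [ne_of_lt hk]), hfr2]
      refine ⟨?_, ?_, ?_⟩
      · intro g hg
        simp only [pvB_groups, List.mem_cons] at hg
        rcases hg with rfl | hg'
        · simp [hfilter_head]
        · have hkmem : g.1 ∈ (rest.dropWhile (fun p => p.1 == n)).map (·.1) :=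
            (ihm g.1).mp (List.mem_map_of_mem hg')
          obtain ⟨z, hz, hzk⟩ := List.mem_map.mp hkmem
          have hk : n < g.1 := hzk ▸ hd_gt z hz
          rw [ihc g hg', ← hfilter_rec g.1 hk]
      · simp only [pvB_groups, List.map_cons]
        refine List.pairwise_cons.mpr ⟨?_, ihp⟩
        intro k hk
        obtain ⟨z, hz, hzk⟩ := List.mem_map.mp ((ihm k).mp hk)
        exact hzk ▸ hd_gt z hz
      · intro k
        simp only [pvB_groups, List.map_cons, List.mem_cons, ihm]
        constructor
        · rintro (rfl | hk)
          · exact Or.inl rfl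
          · obtain ⟨z, hz, hzk⟩ := List.mem_map.mp hk
            exact Or.inr (hzk ▸ List.mem_map_of_mem (hdsub.subset hz))
        · rintro (rfl | hk)
          · exact Or.inl rfl
          · obtain ⟨z, hz, hzk⟩ := List.mem_map.mp hk
            rw [← hsplit] at hz
            rcases List.mem_append.mp hz with hz' | hz'
            · exact Or.inl (hzk.symm.trans (ht z hz'))
            · exact Or.inr (hzk ▸ List.mem_map_of_mem hz')

theorem expand_wabi_eq (benefit_names : List String) (weights : List Int) :
    expand_wabi benefit_names weights = expand_wabi_alt benefit_names weights := by
  unfold expand_wabi expand_wabi_alt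
  by_cases h : benefit_names.length = weights.length
  · simp only [h, ne_eq, not_true_eq_false, if_false]
    rw [PySem.List.foldl_prod_mk
        (f := fun (d : PySem.Dict String Int) (p : String × Int) => d.modify p.1 0 (· + 1))
        (g := fun (d : PySem.Dict String (List Int)) (p : String × Int) => d.modify p.1 [] (· ++ [p.2]))]
    rw [PySem.List.foldl_prod_mk
        (f := fun (a : List String) (name : String) => a ++
          [(pvA_build ((benefit_names.zip weights).foldl (fun d p => d.modify p.1 [] (· ++ [p.2])) PySem.Dict.empty) name).1])
        (g := fun (a : List String) (name : String) => a ++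
          [(pvA_build ((benefit_names.zip weights).foldl (fun d p => d.modify p.1 [] (· ++ [p.2])) PySem.Dict.empty) name).2])]
    rw [PySem.List.foldl_append_singleton_eq_map, PySem.List.foldl_append_singleton_eq_map]
    rw [groups_keys, List.map_fst_zip (le_of_eq h)]
    have hpw := PySem.List.sorted_pairwise (benefit_names.zip weights) (fun p => p.1)
    obtain ⟨hc, hlt, hmem⟩ := groups_walk _ hpw
    -- the sorted distinct names ARE the keys of the group walk, in order
    have hsorteq : PySem.List.sorted (PySem.Set.ofList benefit_names) (fun x => x) false
        = (pvB_groups (PySem.List.sorted (benefit_names.zip weights) (fun p => p.1) false)).map (·.1) := by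
      refine PySem.List.sorted_eq_of_perm_of_pairwise_lt _ _ _ ?_ hlt
      refine (List.perm_ext_iff_of_nodup (hlt.imp ne_of_lt) (PySem.Set.nodup_ofList _)).mpr ?_
      intro k
      rw [hmem k, map_fst_sorted, List.map_fst_zip (le_of_eq h),
          (PySem.List.sorted_perm benefit_names (fun x => x) false).mem_iff,
          PySem.Set.mem_ofList]
    rw [hsorteq]
    -- both sides are now maps over the same group list; pieces agree group by group
    have hpair : ∀ g ∈ pvB_groups (PySem.List.sorted (benefit_names.zip weights) (fun p => p.1) false),
        pvA_build ((benefit_names.zip weights).foldl (fun d p => d.modify p.1 [] (· ++ [p.2])) PySem.Dict.empty) g.1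
          = pvB_piece g.1 g.2 := by
      intro g hg
      rw [build_eq_piece _ _ _ (groups_getD _ _), hc g hg, filter_sorted]
    simp only [List.nil_append, List.map_map, Function.comp_def]
    rw [List.map_congr_left (fun g hg => by rw [hpair g hg] :
          ∀ g ∈ pvB_groups (PySem.List.sorted (benefit_names.zip weights) (fun p => p.1) false),
            (pvA_build ((benefit_names.zip weights).foldl (fun d p => d.modify p.1 [] (· ++ [p.2])) PySem.Dict.empty) g.1).1
              = (pvB_piece g.1 g.2).1),
        List.map_congr_left (fun g hg => by rw [hpair g hg] :
          ∀ g ∈ pvB_groups (PySem.List.sorted (benefit_names.zip weights) (fun p => p.1) false),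
            (pvA_build ((benefit_names.zip weights).foldl (fun d p => d.modify p.1 [] (· ++ [p.2])) PySem.Dict.empty) g.1).2
              = (pvB_piece g.1 g.2).2)]
  · simp only [h, ne_eq, not_false_eq_true, if_true]

-- ===== VERDICT (by name: the statement is the Claim_ definition above) =====
theorem expand_wabi_spec : Claim_equal_expand_wabi := by
  intro names ws _
  unfold Spec_expand_wabi
  exact expand_wabi_eq names ws
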